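-- pv_equiv track=rewrite | github.com/Volpestyle/vuhlp-code | cmd/agentd/main.py | parse_key_list
-- ===== SOURCE A (Python) =====
-- def parse_key_list(value: str) -> list[str]:
--     parts = [item.strip() for item in value.replace(";", ",").replace("\n", " ").split(",")]
--     out = []
--     for part in parts:
--         for sub in part.split():
--             if sub:
--                 out.append(sub)
--     return out
-- ===== SOURCE B (Python) =====
-- def parse_key_list(value: str) -> list[str]:
--     out = []
--     buf = ""
--     for c in value:
--         if c == "," or c == ";" or c.isspace():
--             if buf:
--                 out.append(buf)
--                 buf = ""
--         else:
--             buf += c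
--     if buf:
--         out.append(buf)
--     return out
-- ===== Notes on version B (the rewrite author's own statement) =====
-- stated objective: alternative
-- what changed: Replaced A's replace/split/strip/nested-split string-method pipeline with a single explicit character-by-character scan that accumulates the current token in a buffer and flushes it at each delimiter (',', ';', or whitespace).
import Mathlib
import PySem

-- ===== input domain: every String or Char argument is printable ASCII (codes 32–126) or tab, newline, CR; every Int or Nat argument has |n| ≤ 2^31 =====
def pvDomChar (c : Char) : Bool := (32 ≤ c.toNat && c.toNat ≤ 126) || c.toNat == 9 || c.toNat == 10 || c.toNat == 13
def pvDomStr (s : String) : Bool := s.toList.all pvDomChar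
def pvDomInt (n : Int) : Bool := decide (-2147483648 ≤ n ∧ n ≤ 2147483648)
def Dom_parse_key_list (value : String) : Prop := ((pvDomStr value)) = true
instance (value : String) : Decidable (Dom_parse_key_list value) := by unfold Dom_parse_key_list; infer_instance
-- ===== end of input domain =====

-- B replaces A's replace/split/strip/nested-split pipeline by one explicit character scan with a token buffer (alternative algorithm, same O(n) cost).

-- ===== PORT A =====
-- parts = [item.strip() for item in value.replace(";", ",").replace("\n", " ").split(",")]
-- (split? never returns none here since the separator "," is non-empty; .getD [] is unreachable)
def parse_key_list (value : String) : List String :=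
  let parts : List String :=
    ((PySem.Str.split? (PySem.Str.replace (PySem.Str.replace value ";" ",") "\n" " ") ",").getD []).map
      (fun item => PySem.Str.strip item)
  parts.foldl
    (fun out part =>
      (PySem.Str.split₀ part).foldl (fun out sub => if sub ≠ "" then out ++ [sub] else out) out)
    []

-- ===== PORT B =====
-- single pass; the current-token buffer `buf` is kept as a List Char (Lean's String.push is
-- kernel-opaque; the buffer holds exactly Python's `buf`), turned into a String when flushed
def pkDelim (c : Char) : Bool := c == ',' || c == ';' || PySem.Chars.isspace c

def pkStep (s : List (List Char) × List Char) (c : Char) : List (List Char) × List Char :=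
  if pkDelim c then (if s.2.isEmpty then s else (s.1 ++ [s.2], [])) else (s.1, s.2 ++ [c])

def parse_key_list_alt (value : String) : List String :=
  let r := value.toList.foldl pkStep ([], [])
  (if r.2.isEmpty then r.1 else r.1 ++ [r.2]).map (fun t => String.ofList t)

-- ===== PRECONDITION & SPEC =====
def Spec_parse_key_list (value : String) (out : List String) : Prop := out = parse_key_list_alt value
instance (value : String) (out : List String) : Decidable (Spec_parse_key_list value out) := by unfold Spec_parse_key_list; infer_instance

-- ===== CLAIM (what is proved, stated in full; the proofs are below) =====
def Claim_equal_parse_key_list : Prop := ∀ (value : String), Dom_parse_key_list value → Spec_parse_key_list value (parse_key_list value)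

-- ===== LEMMAS AND PROOFS =====

-- generic one-pass tokenizer (step, and fold-with-final-flush) over a delimiter predicate;
-- both ports and all of A's library calls are reduced to this shape
def tstep (P : Char → Bool) (s : List (List Char) × List Char) (c : Char) : List (List Char) × List Char :=
  if P c then (if s.2.isEmpty then s else (s.1 ++ [s.2], [])) else (s.1, s.2 ++ [c])

def tfin (P : Char → Bool) (p : List Char) (s : List (List Char) × List Char) : List (List Char) :=
  let r := p.foldl (tstep P) s
  if r.2.isEmpty then r.1 else r.1 ++ [r.2]

-- the character map performed by A's two `.replace` calls
def pkMapF (c : Char) : Char :=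
  if (if c = ';' then ',' else c) = '\n' then ' ' else (if c = ';' then ',' else c)

-- delimiter predicate after the replaces: comma or whitespace
def pkDelim' (c : Char) : Bool := c == ',' || PySem.Chars.isspace c

-- forward recursion equivalent of Chars.splitOn · [','] with a current-segment accumulator
def pkSb : List Char → List Char → List (List Char)
  | [], cur => [cur]
  | c :: r, cur => if c = ',' then cur :: pkSb r [] else pkSb r (cur ++ [c])

theorem replace_go (o n : Char) : ∀ (p : List Char) (fuel : Nat) (acc : List Char), p.length ≤ fuel →
    PySem.Chars.replace.go [o] [n] fuel p acc = acc.reverse ++ p.map (fun c => if c = o then n else c) := by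
  intro p
  induction p with
  | nil => intro fuel acc h; cases fuel <;> simp [PySem.Chars.replace.go]
  | cons c rest ih =>
    intro fuel acc h
    cases fuel with
    | zero => simp at h
    | succ fuel =>
      have hf : rest.length ≤ fuel := by simpa using h
      by_cases hc : c = o
      · subst hc
        simp only [PySem.Chars.replace.go]
        rw [if_pos (by simp [List.isPrefixOf])]
        simp only [List.length_singleton, List.drop_succ_cons, List.drop_zero]
        rw [ih fuel ([n].reverse ++ acc) hf]
        simp
      · simp only [PySem.Chars.replace.go]
        rw [if_neg (by simp; intro h; exact hc (by simpa using h.symm)), ih fuel (c :: acc) hf]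
        simp [hc]

theorem replace_single (s : List Char) (o n : Char) :
    PySem.Chars.replace s [o] [n] = s.map (fun c => if c = o then n else c) := by
  simp [PySem.Chars.replace, replace_go o n s s.length [] (le_refl _)]

theorem splitOn_go : ∀ (p : List Char) (fuel : Nat) (cur : List Char) (acc : List (List Char)),
    p.length < fuel →
    PySem.Chars.splitOn.go [','] fuel p cur acc = acc.reverse ++ pkSb p cur.reverse := by
  intro p
  induction p with
  | nil =>
    intro fuel cur acc h
    cases fuel with
    | zero => omega
    | succ fuel => simp [PySem.Chars.splitOn.go, pkSb]
  | cons c rest ih =>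
    intro fuel cur acc h
    cases fuel with
    | zero => omega
    | succ fuel =>
      have hf : rest.length < fuel := by simp at h; omega
      by_cases hc : c = ','
      · subst hc
        simp only [PySem.Chars.splitOn.go]
        rw [if_pos (by simp [List.isPrefixOf])]
        simp only [List.length_singleton, List.drop_succ_cons, List.drop_zero]
        rw [ih fuel [] (cur.reverse :: acc) hf]
        simp [pkSb]
      · simp only [PySem.Chars.splitOn.go]
        rw [if_neg (by simp; intro h; exact hc (by simpa using h.symm)), ih fuel (c :: cur) acc hf]
        simp [pkSb, hc]

theorem splitOn_comma (s : List Char) : PySem.Chars.splitOn s [','] = pkSb s [] := by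
  have := splitOn_go s (s.length + 1) [] [] (by omega)
  simpa [PySem.Chars.splitOn] using this

theorem split₀_go : ∀ (p cur : List Char) (acc : List (List Char)),
    PySem.Chars.split₀.go p cur acc = tfin PySem.Chars.isspace p (acc.reverse, cur.reverse) := by
  intro p
  induction p with
  | nil =>
    intro cur acc
    simp only [PySem.Chars.split₀.go, tfin, List.foldl_nil]
    by_cases hc : cur = [] <;> simp [hc]
  | cons c rest ih =>
    intro cur acc
    by_cases hs : PySem.Chars.isspace c
    · by_cases hc : cur = []
      · subst hc
        simp only [PySem.Chars.split₀.go, hs, if_true, List.isEmpty_nil, ih]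
        simp [tfin, tstep, hs]
      · simp only [PySem.Chars.split₀.go, hs, if_true]
        rw [if_neg (by simpa using hc), ih]
        simp [tfin, tstep, hs, hc]
    · simp only [PySem.Chars.split₀.go, hs, if_false, Bool.false_eq_true]
      rw [ih]
      simp [tfin, tstep, hs]

theorem split₀_tfin (p : List Char) : PySem.Chars.split₀ p = tfin PySem.Chars.isspace p ([], []) := by
  simpa using split₀_go p [] []

-- all-space prefix from the empty state is a no-op
theorem space_prefix_fold (t : List Char) (h : ∀ c ∈ t, PySem.Chars.isspace c = true) :
    t.foldl (tstep PySem.Chars.isspace) ([], []) = ([], []) := by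
  induction t with
  | nil => rfl
  | cons c r ih =>
    simp only [List.foldl_cons, tstep, h c (by simp), if_true, List.isEmpty_nil]
    exact ih (fun c hc => h c (by simp [hc]))

-- all-space suffix only flushes
theorem space_suffix_fold (t : List Char) : ∀ (s : List (List Char) × List Char),
    (∀ c ∈ t, PySem.Chars.isspace c = true) →
    tfin PySem.Chars.isspace t s = (if s.2.isEmpty then s.1 else s.1 ++ [s.2]) := by
  induction t with
  | nil => intro s h; rfl
  | cons c r ih =>
    intro s h
    have hc : PySem.Chars.isspace c = true := h c (by simp)
    by_cases he : s.2.isEmpty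
    · simp only [tfin, List.foldl_cons, tstep, hc, if_true, he]
      have := ih s (fun c hc => h c (by simp [hc]))
      simpa [tfin, he] using this
    · simp only [tfin, List.foldl_cons, tstep, hc, if_true]
      rw [if_neg he, if_neg he]
      have := ih (s.1 ++ [s.2], []) (fun c hc => h c (by simp [hc]))
      simpa [tfin] using this

theorem tfin_append (P : Char → Bool) (a b : List Char) (s : List (List Char) × List Char) :
    tfin P (a ++ b) s = tfin P b (a.foldl (tstep P) s) := by
  simp [tfin, List.foldl_append]

theorem strip_tfin (p : List Char) :
    tfin PySem.Chars.isspace (PySem.Chars.strip p) ([], []) = tfin PySem.Chars.isspace p ([], []) := by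
  have h1 : tfin PySem.Chars.isspace (PySem.Chars.lstrip p) ([], []) = tfin PySem.Chars.isspace p ([], []) := by
    conv_rhs => rw [show p = p.takeWhile PySem.Chars.isspace ++ p.dropWhile PySem.Chars.isspace from
      (List.takeWhile_append_dropWhile).symm]
    rw [tfin_append, space_prefix_fold _ (fun c hc => List.mem_takeWhile_imp hc)]
    rfl
  set q := PySem.Chars.lstrip p with hq
  have h2 : q = PySem.Chars.rstrip q ++ (q.reverse.takeWhile PySem.Chars.isspace).reverse := by
    simp only [PySem.Chars.rstrip]
    rw [← List.reverse_append]
    conv_lhs => rw [show q = q.reverse.reverse by simp]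
    rw [show q.reverse = q.reverse.takeWhile PySem.Chars.isspace ++ q.reverse.dropWhile PySem.Chars.isspace from
      (List.takeWhile_append_dropWhile).symm]
    simp
  have h3 : tfin PySem.Chars.isspace q ([], []) = tfin PySem.Chars.isspace (PySem.Chars.rstrip q) ([], []) := by
    conv_lhs => rw [h2]
    rw [tfin_append, space_suffix_fold _ _ (by intro c hc; exact List.mem_takeWhile_imp (by simpa using hc))]
    rfl
  calc tfin PySem.Chars.isspace (PySem.Chars.strip p) ([], [])
      = tfin PySem.Chars.isspace (PySem.Chars.rstrip q) ([], []) := by rw [PySem.Chars.strip, hq]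
    _ = tfin PySem.Chars.isspace q ([], []) := h3.symm
    _ = tfin PySem.Chars.isspace p ([], []) := h1

theorem no_nil_fold (P : Char → Bool) : ∀ (p : List Char) (o : List (List Char)) (b : List Char),
    [] ∉ o → [] ∉ (p.foldl (tstep P) (o, b)).1 := by
  intro p
  induction p with
  | nil => intro o b h; simpa using h
  | cons c r ih =>
    intro o b h
    simp only [List.foldl_cons, tstep]
    by_cases hP : P c
    · simp only [hP, if_true]
      by_cases hb : (b : List Char).isEmpty
      · simp only [hb, if_true]; exact ih o b h
      · simp only [hb, Bool.false_eq_true, if_false]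
        exact ih _ [] (by simp [h]; intro hb'; subst hb'; simp at hb)
    · simp only [hP, Bool.false_eq_true, if_false]; exact ih o _ h

theorem no_nil_tfin (P : Char → Bool) (p : List Char) : [] ∉ tfin P p ([], []) := by
  have h := no_nil_fold P p [] [] (by simp)
  simp only [tfin]
  by_cases he : (p.foldl (tstep P) ([], [])).2.isEmpty
  · simpa [he] using h
  · simp only [he, Bool.false_eq_true, if_false]
    simp only [List.mem_append, List.mem_singleton]
    rintro (hx | hx)
    · exact h hx
    · rw [← hx] at he; simp at he

theorem prefix_out (P : Char → Bool) : ∀ (p : List Char) (o0 o : List (List Char)) (b : List Char),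
    p.foldl (tstep P) (o0 ++ o, b) =
      (o0 ++ (p.foldl (tstep P) (o, b)).1, (p.foldl (tstep P) (o, b)).2) := by
  intro p
  induction p with
  | nil => intro o0 o b; rfl
  | cons c r ih =>
    intro o0 o b
    simp only [List.foldl_cons, tstep]
    by_cases hP : P c
    · by_cases hb : (b : List Char).isEmpty
      · simp only [hP, if_true, hb]; exact ih o0 o b
      · simp only [hP, if_true, hb, Bool.false_eq_true, if_false]
        rw [List.append_assoc] at *
        exact ih o0 (o ++ [b]) []
    · simp only [hP, Bool.false_eq_true, if_false]; exact ih o0 o _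

theorem tfin_prefix_out (P : Char → Bool) (p : List Char) (o0 : List (List Char)) :
    tfin P p (o0, []) = o0 ++ tfin P p ([], []) := by
  have := prefix_out P p o0 [] []
  simp only [List.append_nil] at this
  simp only [tfin, this]
  by_cases he : (p.foldl (tstep P) ([], [])).2.isEmpty <;> simp [he]

theorem congr_isspace_delim' : ∀ (p : List Char), ',' ∉ p → ∀ (s : List (List Char) × List Char),
    p.foldl (tstep PySem.Chars.isspace) s = p.foldl (tstep pkDelim') s := by
  intro p
  induction p with
  | nil => intro _ s; rfl
  | cons c r ih =>
    intro h s
    have hc : c ≠ ',' := by intro hc; exact h (by simp [hc])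
    have : pkDelim' c = PySem.Chars.isspace c := by simp [pkDelim', hc]
    simp only [List.foldl_cons, tstep, this]
    exact ih (fun hm => h (by simp [hm])) _

theorem main_comma : ∀ (ds : List Char) (cur : List Char), ',' ∉ cur →
    (pkSb ds cur).flatMap (fun p => tfin PySem.Chars.isspace p ([], [])) =
      tfin pkDelim' (cur ++ ds) ([], []) := by
  intro ds
  induction ds with
  | nil =>
    intro cur h
    simp only [pkSb, List.flatMap_cons, List.flatMap_nil, List.append_nil]
    simp only [tfin, congr_isspace_delim' cur h]
  | cons c r ih =>
    intro cur h
    by_cases hc : c = ','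
    · subst hc
      simp only [pkSb, if_true, List.flatMap_cons]
      rw [ih [] (by simp)]
      have key : tfin pkDelim' (cur ++ ',' :: r) ([], []) =
          tfin pkDelim' cur ([], []) ++ tfin pkDelim' r ([], []) := by
        have hsplit : (cur ++ ',' :: r) = (cur ++ [',']) ++ r := by simp
        have hstate : (cur ++ [',']).foldl (tstep pkDelim') ([], []) =
            (tfin pkDelim' cur ([], []), []) := by
          rw [List.foldl_append]
          simp only [List.foldl_cons, List.foldl_nil, tstep, pkDelim']
          set q := cur.foldl (tstep pkDelim') ([], []) with hqdef
          by_cases hq : q.2.isEmpty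
          · simp only [if_true, hq, BEq.rfl, Bool.true_or]
            have h1 : tfin pkDelim' cur ([], []) = q.1 := by simp [tfin, ← hqdef, hq]
            rw [h1]
            have h2 : q = (q.1, q.2) := rfl
            rw [h2]; simp [List.isEmpty_iff.mp hq]
          · simp only [hq, Bool.false_eq_true, if_false, BEq.rfl, Bool.true_or, if_true]
            have h1 : tfin pkDelim' cur ([], []) = q.1 ++ [q.2] := by simp [tfin, ← hqdef, hq]
            rw [h1]
        rw [hsplit, show tfin pkDelim' (cur ++ [','] ++ r) ([], []) =
            tfin pkDelim' r ((cur ++ [',']).foldl (tstep pkDelim') ([], [])) by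
          simp [tfin, List.foldl_append], hstate]
        exact tfin_prefix_out pkDelim' r _
      rw [key]
      simp only [List.nil_append]
      congr 1
      simp only [tfin, congr_isspace_delim' cur h]
    · simp only [pkSb, hc, if_false]
      rw [ih (cur ++ [c]) (by simp [h]; exact fun hcc => hc hcc.symm)]
      congr 1
      simp

-- the character map of the replaces preserves delimiterhood and fixes non-delimiters
theorem pkMapF_delim (c : Char) : pkDelim' (pkMapF c) = pkDelim c := by
  by_cases h1 : c = ';'
  · subst h1; decide
  · by_cases h2 : c = '\n'
    · subst h2; decide
    · have h1' : (c == ';') = false := by simpa using h1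
      simp [pkMapF, pkDelim', pkDelim, h1, h2, h1']

theorem pkMapF_fix (c : Char) (h : pkDelim c = false) : pkMapF c = c := by
  have h1 : c ≠ ';' := by intro hc; subst hc; simp [pkDelim] at h
  have h2 : c ≠ '\n' := by intro hc; subst hc; simp [pkDelim, PySem.Chars.isspace] at h
  simp [pkMapF, h1, h2]

theorem map_f_fold : ∀ (cs : List Char) (s : List (List Char) × List Char),
    (cs.map pkMapF).foldl (tstep pkDelim') s = cs.foldl (tstep pkDelim) s := by
  intro cs
  induction cs with
  | nil => intro s; rfl
  | cons c r ih =>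
    intro s
    simp only [List.map_cons, List.foldl_cons]
    have hstep : tstep pkDelim' s (pkMapF c) = tstep pkDelim s c := by
      by_cases h : pkDelim c
      · simp [tstep, pkMapF_delim, h]
      · have hfix := pkMapF_fix c (by simpa using h)
        have h' : pkDelim' c = false := by rw [← hfix, pkMapF_delim]; simpa using h
        rw [hfix]
        simp [tstep, h', h]
    rw [hstep, ih]

-- A's inner loop over the (never-empty) words is a plain append
theorem if_append_fold : ∀ (subs out : List String), (∀ s ∈ subs, s ≠ "") →
    subs.foldl (fun out sub => if sub ≠ "" then out ++ [sub] else out) out = out ++ subs := by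
  intro subs
  induction subs with
  | nil => intro out _; simp
  | cons s r ih =>
    intro out h
    simp only [List.foldl_cons, h s (by simp), ne_eq, not_false_eq_true, if_true]
    rw [ih _ (fun s hs => h s (by simp [hs]))]
    simp

-- every word split₀ yields is a non-empty string
theorem split₀_ne_empty (p : String) : ∀ sub ∈ PySem.Str.split₀ p, sub ≠ "" := by
  intro sub hs he
  subst he
  have hmem : ("" : String).toList ∈ (PySem.Str.split₀ p).map String.toList := List.mem_map_of_mem hs
  rw [PySem.Str.split₀_map_toList, split₀_tfin] at hmem
  exact no_nil_tfin PySem.Chars.isspace p.toList hmem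

-- ===== VERDICT (by name: the statement is the Claim_ definition above) =====
theorem parse_key_list_spec : Claim_equal_parse_key_list := by
  intro value _
  unfold Spec_parse_key_list
  have hx : (PySem.Str.replace (PySem.Str.replace value ";" ",") "\n" " ").toList
      = value.toList.map pkMapF := by
    rw [PySem.Str.toList_replace, PySem.Str.toList_replace,
      show (";" : String).toList = [';'] from rfl, show ("," : String).toList = [','] from rfl,
      show ("\n" : String).toList = ['\n'] from rfl, show (" " : String).toList = [' '] from rfl,
      replace_single, replace_single, List.map_map]
    rfl
  have hsplit : ∃ l : List String,
      PySem.Str.split? (PySem.Str.replace (PySem.Str.replace value ";" ",") "\n" " ") "," = some l ∧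
      l.map String.toList = pkSb (value.toList.map pkMapF) [] := by
    have hb := PySem.Str.split?_map (PySem.Str.replace (PySem.Str.replace value ";" ",") "\n" " ") ","
    rw [show ("," : String).toList = [','] from rfl] at hb
    rw [show PySem.Chars.split? (PySem.Str.replace (PySem.Str.replace value ";" ",") "\n" " ").toList [',']
        = some (PySem.Chars.splitOn (PySem.Str.replace (PySem.Str.replace value ";" ",") "\n" " ").toList [','])
      from rfl] at hb
    cases hsp : PySem.Str.split? (PySem.Str.replace (PySem.Str.replace value ";" ",") "\n" " ") "," with
    | none => rw [hsp] at hb; simp at hb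
    | some l =>
      refine ⟨l, rfl, ?_⟩
      rw [hsp] at hb
      simp only [Option.map_some, Option.some.injEq] at hb
      rw [hb, splitOn_comma, hx]
  obtain ⟨l, hl, hlmap⟩ := hsplit
  have hgetD : (PySem.Str.split?
      (PySem.Str.replace (PySem.Str.replace value ";" ",") "\n" " ") ",").getD [] = l := by
    rw [hl]; rfl
  have hA : parse_key_list value =
      (l.map (fun item => PySem.Str.strip item)).foldl
        (fun out part =>
          (PySem.Str.split₀ part).foldl (fun out sub => if sub ≠ "" then out ++ [sub] else out) out)
        [] := by
    unfold parse_key_list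
    rw [hgetD]
  -- remove the (always-true) non-emptiness test, then turn the fold into a flatMap
  rw [PySem.List.foldl_congr_mem _ _ (fun out part => out ++ PySem.Str.split₀ part) []
    (fun acc part _ => if_append_fold _ acc (split₀_ne_empty part)),
    PySem.List.foldl_append_eq_flatMap, List.nil_append] at hA
  -- character-level value of A
  have hAchars : (parse_key_list value).map String.toList = tfin pkDelim value.toList ([], []) := by
    rw [hA, List.map_flatMap]
    simp only [PySem.Str.split₀_map_toList, split₀_tfin]
    rw [← List.flatMap_map (fun p => String.toList p)
      (fun q => tfin PySem.Chars.isspace q ([], [])) (l.map (fun item => PySem.Str.strip item))]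
    have hparts : (l.map (fun item => PySem.Str.strip item)).map (fun p => String.toList p)
        = (pkSb (value.toList.map pkMapF) []).map PySem.Chars.strip := by
      rw [List.map_map]
      have : ((fun p => String.toList p) ∘ fun item => PySem.Str.strip item)
          = (PySem.Chars.strip ∘ String.toList) := by
        funext item; exact PySem.Str.toList_strip item
      rw [this, ← List.map_map, hlmap]
    rw [hparts, List.flatMap_map]
    simp only [strip_tfin]
    rw [main_comma (value.toList.map pkMapF) [] (by simp), List.nil_append]
    simp only [tfin, map_f_fold]
  -- B is literally the pkDelim tokenizer followed by String.ofList
  have hB : parse_key_list_alt value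
      = (tfin pkDelim value.toList ([], [])).map (fun t => String.ofList t) := rfl
  calc parse_key_list value
      = ((parse_key_list value).map String.toList).map (fun t => String.ofList t) := by
        rw [List.map_map]
        have : ((fun t => String.ofList t) ∘ String.toList) = id := by
          funext s; simp
        rw [this, List.map_id]
    _ = (tfin pkDelim value.toList ([], [])).map (fun t => String.ofList t) := by rw [hAchars]
    _ = parse_key_list_alt value := hB.symm
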